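-- pv_equiv track=rewrite | github.com/simi-zat/Advent_of_Code_2023 | day_02/day_02.py | get_game_power_part2
-- ===== SOURCE A (Python) =====
-- def get_game_power_part2(game_information: list[str]) -> int:
--     min_required_cubes = [0, 0, 0]  # RGB
--
--     for i in range(0, len(game_information), 2):
--         if game_information[i + 1] == 'red':
--             min_required_cubes[0] = max(min_required_cubes[0], int(game_information[i]))
--         elif game_information[i + 1] == 'green':
--             min_required_cubes[1] = max(min_required_cubes[1], int(game_information[i]))
--         elif game_information[i + 1] == 'blue':
--             min_required_cubes[2] = max(min_required_cubes[2], int(game_information[i]))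
--
--     return min_required_cubes[0] * min_required_cubes[1] * min_required_cubes[2]
-- ===== SOURCE B (Python) =====
-- def get_game_power_part2(game_information: list[str]) -> int:
--     pairs = list(zip(game_information[::2], game_information[1::2]))
--     power = 1
--     for color in ('red', 'green', 'blue'):
--         power *= max([int(count) for count, col in pairs if col == color] + [0])
--     return power
-- ===== Notes on version B (the rewrite author's own statement) =====
-- stated objective: alternative
-- what changed: B pairs the flat token list once via zip of the even/odd step-2 slices and then takes an independent max (floored at 0 by appending 0) per color over that pair list, multiplying the three maxima, instead of A's single index loop threading three inline accumulators.
import Mathlib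
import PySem

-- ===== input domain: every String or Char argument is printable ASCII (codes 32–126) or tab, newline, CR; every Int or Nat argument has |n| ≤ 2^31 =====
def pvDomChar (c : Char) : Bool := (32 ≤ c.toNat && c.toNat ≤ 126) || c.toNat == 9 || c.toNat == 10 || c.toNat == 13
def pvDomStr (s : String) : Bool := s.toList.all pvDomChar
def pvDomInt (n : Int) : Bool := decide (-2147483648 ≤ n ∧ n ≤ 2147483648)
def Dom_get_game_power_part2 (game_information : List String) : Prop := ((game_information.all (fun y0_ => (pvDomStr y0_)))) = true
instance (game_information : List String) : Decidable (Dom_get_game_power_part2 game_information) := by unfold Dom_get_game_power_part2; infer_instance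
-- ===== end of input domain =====

-- B pairs the token list once via zip of the even/odd step-2 slices, then takes one
-- 0-floored max per color and multiplies them, instead of A's single index loop
-- threading three accumulators; same O(n) cost (objective: alternative).

-- ===== PORT A =====
-- one iteration of A's `for i in range(0, len(gi), 2)` body (branch order as in A)
def pvAStep (gi : List String) (st : Int × Int × Int) (i : Int) : Int × Int × Int :=
  if (PySem.List.pyGet? gi (i + 1)).getD "" = "red" then
    (max st.1 ((PySem.Int.ofStr? ((PySem.List.pyGet? gi i).getD "")).getD 0), st.2.1, st.2.2)
  else if (PySem.List.pyGet? gi (i + 1)).getD "" = "green" then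
    (st.1, max st.2.1 ((PySem.Int.ofStr? ((PySem.List.pyGet? gi i).getD "")).getD 0), st.2.2)
  else if (PySem.List.pyGet? gi (i + 1)).getD "" = "blue" then
    (st.1, st.2.1, max st.2.2 ((PySem.Int.ofStr? ((PySem.List.pyGet? gi i).getD "")).getD 0))
  else st

-- indexing and int() are total here via .getD; Pre_ excludes the raising inputs
def get_game_power_part2 (game_information : List String) : Int :=
  let st := (PySem.List.pyRange 0 game_information.length 2).foldl (pvAStep game_information) (0, 0, 0)
  st.1 * st.2.1 * st.2.2

-- ===== PORT B =====
-- [int(count) for count, col in pairs if col == color]  (int() total via .getD; Pre_ excludes ValueError)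
def pvInts (pairs : List (String × String)) (color : String) : List Int :=
  pairs.filterMap (fun p => if p.2 = color then some ((PySem.Int.ofStr? p.1).getD 0) else none)

-- max([...] + [0])
def pvColorMax (pairs : List (String × String)) (color : String) : Int :=
  (PySem.List.max? (pvInts pairs color ++ [0]) (fun x => x)).getD 0

def get_game_power_part2_alt (game_information : List String) : Int :=
  let pairs := List.zip ((PySem.List.slice? game_information none none 2).getD [])
                        ((PySem.List.slice? game_information (some 1) none 2).getD [])
  ["red", "green", "blue"].foldl (fun power color => power * pvColorMax pairs color) 1

-- ===== PRECONDITION & SPEC =====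
-- consecutive (count, color) pairs of the token list (an unpaired last token is dropped)
def pvChunk2 : List String → List (String × String)
  | [] => []
  | [_] => []
  | x :: y :: t => (x, y) :: pvChunk2 t

-- A raises IndexError on odd-length input (gi[i+1] past the end) and ValueError when a
-- count whose color is red/green/blue does not parse as an int; Pre_ excludes exactly those.
def Pre_get_game_power_part2 (game_information : List String) : Prop :=
  game_information.length % 2 = 0 ∧
  ∀ p ∈ pvChunk2 game_information,
    (p.2 = "red" ∨ p.2 = "green" ∨ p.2 = "blue") → (PySem.Int.ofStr? p.1).isSome = true
instance (game_information : List String) : Decidable (Pre_get_game_power_part2 game_information) := by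
  unfold Pre_get_game_power_part2; infer_instance

def pvWitness_get_game_power_part2 : List String := ["3", "red", "4", "blue"]

def Spec_get_game_power_part2 (game_information : List String) (out : Int) : Prop := out = get_game_power_part2_alt game_information
instance (game_information : List String) (out : Int) : Decidable (Spec_get_game_power_part2 game_information out) := by unfold Spec_get_game_power_part2; infer_instance

-- ===== CLAIM (what is proved, stated in full; the proofs are below) =====
def Claim_equal_get_game_power_part2 : Prop := ∀ (game_information : List String), Dom_get_game_power_part2 game_information → Pre_get_game_power_part2 game_information → Spec_get_game_power_part2 game_information (get_game_power_part2 game_information)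

-- ===== LEMMAS AND PROOFS =====

-- even/odd-position sublists: gi[::2] and gi[1::2]
def pvEvens {α : Type} : List α → List α
  | [] => [] | [x] => [x] | x :: _ :: t => x :: pvEvens t

def pvOdds {α : Type} : List α → List α
  | [] => [] | [_] => [] | _ :: y :: t => y :: pvOdds t

theorem pvSlice?_evens {α : Type} (xs : List α) :
    PySem.List.slice? xs none none 2 = some (pvEvens xs) := by
  induction xs using pvEvens.induct with
  | case1 => simp [PySem.List.slice?, PySem.List.sliceIndices, pvEvens]
  | case2 x => simp [PySem.List.slice?, PySem.List.sliceIndices, pvEvens]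
  | case3 x y t ih =>
    unfold PySem.List.slice? PySem.List.sliceIndices at ih ⊢
    norm_num at ih ⊢
    have h1 : (((t.length : Int) + 1 + 1 + 2 - 1) / 2).toNat
        = (if 0 < t.length then (((t.length : Int) + 2 - 1) / 2).toNat else 0) + 1 := by
      rcases Nat.eq_zero_or_pos t.length with h | h
      · simp [h]
      · simp [h]; omega
    simp only [show ((0:Int) ≤ (t.length : Int) + 1) = True by simp [Int.le_add_one (Int.natCast_nonneg _)],
      if_true, h1, List.range_succ_eq_map, List.filterMap_cons, List.filterMap_map]
    norm_num [pvEvens]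
    rw [← ih]
    apply List.filterMap_congr; intro k _
    have h2 : (2 * ((k : Int) + 1)).toNat = (2 * (k : Int)).toNat + 2 := by omega
    simp [h2]

theorem pvSlice?_odds {α : Type} (xs : List α) :
    PySem.List.slice? xs (some 1) none 2 = some (pvOdds xs) := by
  induction xs using pvOdds.induct with
  | case1 => simp [PySem.List.slice?, PySem.List.sliceIndices, pvOdds]
  | case2 x => simp [PySem.List.slice?, PySem.List.sliceIndices, pvOdds]
  | case3 x y t ih =>
    cases t with
    | nil =>
      simp [PySem.List.slice?, PySem.List.sliceIndices, pvOdds]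
    | cons z t' =>
      unfold PySem.List.slice? PySem.List.sliceIndices at ih ⊢
      norm_num at ih ⊢
      have hmin : min (1:Int) (↑t'.length + 1 + 1 + 1) = 1 := by omega
      have hif : (0:Int) ≤ ↑t'.length + 1 := by omega
      rw [hmin, if_pos hif]
      have h1 : (((t'.length : Int) + 1 + 1 + 1 - 1 + 2 - 1) / 2).toNat
          = (if 0 < t'.length then (((t'.length : Int) + 2 - 1) / 2).toNat else 0) + 1 := by
        split_ifs with h <;> omega
      rw [h1, List.range_succ_eq_map, List.filterMap_cons]
      norm_num [pvOdds]
      rw [← ih]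
      apply List.filterMap_congr; intro k _
      have h2 : (1 + 2 * ((k : Int) + 1)).toNat = (1 + 2 * (k : Int)).toNat + 2 := by omega
      simp [h2]

theorem pvZip_chunk2 (xs : List String) :
    List.zip (pvEvens xs) (pvOdds xs) = pvChunk2 xs := by
  induction xs using pvChunk2.induct with
  | case1 => rfl
  | case2 x => rfl
  | case3 x y t ih => simp [pvEvens, pvOdds, pvChunk2, ih]

-- value-level step on one (count, color) pair, matching A's branch structure
def pvPairStep (st : Int × Int × Int) (p : String × String) : Int × Int × Int :=
  let v := (PySem.Int.ofStr? p.1).getD 0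
  if p.2 = "red" then (max st.1 v, st.2.1, st.2.2)
  else if p.2 = "green" then (st.1, max st.2.1 v, st.2.2)
  else if p.2 = "blue" then (st.1, st.2.1, max st.2.2 v)
  else st

theorem pvPyRange_two_cons (n : Nat) :
    PySem.List.pyRange 0 ((n : Int) + 2) 2 = 0 :: (PySem.List.pyRange 0 (n : Int) 2).map (· + 2) := by
  unfold PySem.List.pyRange
  have hpos : (0:Int) < (n : Int) + 2 := by omega
  norm_num [hpos]
  have hc : (((n : Int) + 2 + 2 - 1) / 2).toNat = (((n : Int) + 2 - 1) / 2).toNat + 1 := by omega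
  have hcnt : (if 0 < n then (((n : Int) + 2 - 1) / 2).toNat else 0) = (((n : Int) + 2 - 1) / 2).toNat := by
    rcases Nat.eq_zero_or_pos n with h | h
    · subst h; decide
    · simp [h]
  rw [hc, hcnt, List.range_succ_eq_map]
  simp [List.map_map, Function.comp]
  intro a _
  ring

theorem pvPyGet?_cons2 {α : Type} (x y : α) (t : List α) (i : Int) (h : 0 ≤ i) :
    PySem.List.pyGet? (x :: y :: t) (i + 2) = PySem.List.pyGet? t i := by
  have e : (i + 2).toNat = i.toNat + 2 := by omega
  simp [PySem.List.pyGet?, PySem.List.pyIdx?]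
  split_ifs with h1 h2 h2 <;> (try simp_all) <;> omega

theorem pvFoldA (gi : List String) (st : Int × Int × Int) (h : gi.length % 2 = 0) :
    (PySem.List.pyRange 0 gi.length 2).foldl (pvAStep gi) st = (pvChunk2 gi).foldl pvPairStep st := by
  induction gi using pvChunk2.induct generalizing st with
  | case1 => simp [PySem.List.pyRange, pvChunk2]
  | case2 x => simp at h
  | case3 x y t ih =>
    have hlen : ((x :: y :: t).length : Int) = (t.length : Int) + 2 := by simp; ring
    rw [hlen, pvPyRange_two_cons, List.foldl_cons, List.foldl_map]
    have hstep : pvAStep (x :: y :: t) st 0 = pvPairStep st (x, y) := by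
      have hnn : (0:Int) ≤ (t.length : Int) + 1 := by omega
      simp [pvAStep, pvPairStep, PySem.List.pyGet?, PySem.List.pyIdx?, hnn]
    rw [hstep]
    have hcongr : ∀ (acc : Int × Int × Int), ∀ i ∈ PySem.List.pyRange 0 (t.length : Int) 2,
        pvAStep (x :: y :: t) acc (i + 2) = pvAStep t acc i := by
      intro acc i hi
      have hnn : 0 ≤ i := ((PySem.List.mem_pyRange_iff_of_pos (by norm_num) i).1 hi).1
      have e1 : i + 2 + 1 = (i + 1) + 2 := by ring
      simp only [pvAStep, e1, pvPyGet?_cons2 x y t i hnn, pvPyGet?_cons2 x y t (i + 1) (by omega)]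
    rw [PySem.List.foldl_congr_mem _ _ _ _ hcongr]
    simp at h
    rw [ih (pvPairStep st (x, y)) (by omega)]
    simp [pvChunk2]

theorem pvFoldl_max_out (t : List Int) (a b : Int) :
    t.foldl max (max a b) = max (t.foldl max a) b := by
  induction t generalizing a with
  | nil => rfl
  | cons h tl ih =>
    simp only [List.foldl_cons]
    rw [show max (max a b) h = max (max a h) b by omega, ih]

theorem pvColorMax_foldl (pairs : List (String × String)) (color : String) :
    pvColorMax pairs color = (pvInts pairs color).foldl max 0 := by
  unfold pvColorMax
  cases hl : pvInts pairs color with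
  | nil => simp [PySem.List.max?]
  | cons x t =>
    rw [List.cons_append, PySem.List.max?_id_cons]
    simp only [Option.getD_some, List.foldl_append, List.foldl_cons, List.foldl_nil]
    rw [show max (0 : Int) x = max x 0 from max_comm 0 x, pvFoldl_max_out]

theorem pvCore (pairs : List (String × String)) (a b c : Int) :
    pairs.foldl pvPairStep (a, b, c)
      = ((pvInts pairs "red").foldl max a,
         (pvInts pairs "green").foldl max b,
         (pvInts pairs "blue").foldl max c) := by
  induction pairs generalizing a b c with
  | nil => simp [pvInts]
  | cons p t ih =>
    simp only [List.foldl_cons, pvInts, List.filterMap_cons, pvPairStep]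
    by_cases h1 : p.2 = "red"
    · simp [h1, ih, pvInts]
    · by_cases h2 : p.2 = "green"
      · simp [h2, ih, pvInts]
      · by_cases h3 : p.2 = "blue"
        · simp [h3, ih, pvInts]
        · simp [h1, h2, h3, ih, pvInts]

-- ===== VERDICT (by name: the statement is the Claim_ definition above) =====
theorem get_game_power_part2_spec : Claim_equal_get_game_power_part2 := by
  intro gi _ hpre
  unfold Spec_get_game_power_part2
  unfold get_game_power_part2 get_game_power_part2_alt
  rw [pvSlice?_evens, pvSlice?_odds]
  simp only [Option.getD_some, pvZip_chunk2, List.foldl_cons, List.foldl_nil]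
  rw [pvFoldA gi (0, 0, 0) hpre.1, pvCore]
  simp only [pvColorMax_foldl]
  ring
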